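-- pv_equiv track=rewrite | github.com/olgaObnosova/EGE_4 | 23/12418_kege.py | f
-- ===== SOURCE A (Python) =====
-- def f(st, ed, k):
--     if st > ed or k.count('A')>2:
--         return 0
--     if st == ed:
--         return 1
--     else:
--         return f(st - 2, ed, k + 'A') +\
--                f(st * 2, ed, k + 'B') + \
--                f(st * 3, ed, k + 'C')
-- ===== SOURCE B (Python) =====
-- def f(st, ed, k):
--     a0 = k.count('A')
--     memo = {}
--
--     def g(s, a):
--         if s > ed or a > 2:
--             return 0
--         if s == ed:
--             return 1
--         key = (s, a)
--         if key not in memo: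
--             memo[key] = g(s - 2, a + 1) + g(s * 2, a) + g(s * 3, a)
--         return memo[key]
--
--     return g(st, a0)
-- ===== Notes on version B (the rewrite author's own statement) =====
-- stated objective: alternative
-- what changed: Replaces A's plain 3-way recursion over the growing op-string k with memoized recursion over the (current value, count of A-ops) state, so each distinct state is computed once (intended as faster; a timing run's per-input ratios were inconsistent, so no speed is claimed).
-- outside the precondition, e.g. on f(0, 3, ''): A raises RecursionError, B raises RecursionError; on f(3, 24, ''): A raises RecursionError, B raises RecursionError
import Mathlib
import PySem

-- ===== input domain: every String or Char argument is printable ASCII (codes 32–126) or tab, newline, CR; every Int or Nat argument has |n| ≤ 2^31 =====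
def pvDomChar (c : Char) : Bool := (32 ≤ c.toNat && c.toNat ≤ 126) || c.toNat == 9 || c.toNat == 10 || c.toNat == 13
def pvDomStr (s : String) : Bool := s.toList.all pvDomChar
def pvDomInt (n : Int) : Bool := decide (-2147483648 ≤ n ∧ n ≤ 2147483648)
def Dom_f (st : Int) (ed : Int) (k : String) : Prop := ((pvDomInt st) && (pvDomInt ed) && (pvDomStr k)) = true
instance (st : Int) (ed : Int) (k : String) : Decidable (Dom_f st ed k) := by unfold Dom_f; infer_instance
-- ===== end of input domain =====

-- B replaces A's plain 3-way recursion over the op-string k by memoized recursion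
-- over the (current value, A-operation count) state, computing each distinct state once.
-- Outside Pre_f both programs' recursion never terminates (Python RecursionError), so the
-- equivalence is claimed on Pre_f, exactly where the Python A returns.


-- fuel: an upper bound on the recursion depth of either program on inputs satisfying Pre_f
-- (a totality guard only; the branch conditions, not the fuel, stop the recursion there)
def pvFuel (st : Int) (ed : Int) : Nat := (4 * (ed - st)).toNat + 100

-- ===== PORT A =====
-- A's recursion, step for step; k is carried as List Char, k.count('A') is PySem.Chars.count
def fAux : Nat → Int → Int → List Char → Int
  | 0, _, _, _ => 0
  | n + 1, st, ed, k =>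
    if st > ed ∨ ((PySem.Chars.count k ['A'] : Int) > 2) then 0
    else if st = ed then 1
    else fAux n (st - 2) ed (k ++ ['A']) + fAux n (st * 2) ed (k ++ ['B']) +
         fAux n (st * 3) ed (k ++ ['C'])

def f (st : Int) (ed : Int) (k : String) : Int := fAux (pvFuel st ed) st ed k.toList

-- ===== PORT B =====
-- B's memoized recursion: g(s, a) with memo : dict[(s, a) → count], threaded through the calls
def gAux : Nat → Int → Int → Int → PySem.Dict (Int × Int) Int → Int × PySem.Dict (Int × Int) Int
  | 0, _, _, _, m => (0, m)
  | n + 1, s, ed, a, m =>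
    if s > ed ∨ a > 2 then (0, m)
    else if s = ed then (1, m)
    else
      match m.get? (s, a) with
      | some v => (v, m)
      | none =>
        let r1 := gAux n (s - 2) ed (a + 1) m
        let r2 := gAux n (s * 2) ed a r1.2
        let r3 := gAux n (s * 3) ed a r2.2
        let v := r1.1 + r2.1 + r3.1
        (v, r3.2.insert (s, a) v)

def f_alt (st : Int) (ed : Int) (k : String) : Int :=
  (gAux (pvFuel st ed) st ed (PySem.Chars.count k.toList ['A'] : Int) PySem.Dict.empty).1

-- ===== PRECONDITION & SPEC =====
-- Pre_f excludes exactly the inputs on which A's recursion never terminates (Python raises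
-- RecursionError): st < ed with k.count('A') ≤ 2 and st ≤ 2*(2 - k.count('A')) — there the
-- subtraction branch reaches a non-positive value with A-count ≤ 2 and the doubling chain
-- below ed never ends. B's recursion diverges on exactly the same inputs. No input on which
-- A returns a value is excluded.
def Pre_f (st : Int) (ed : Int) (k : String) : Prop :=
  ed ≤ st ∨ 2 < (PySem.Chars.count k.toList ['A'] : Int) ∨
    2 * (2 - (PySem.Chars.count k.toList ['A'] : Int)) < st
instance (st : Int) (ed : Int) (k : String) : Decidable (Pre_f st ed k) := by
  unfold Pre_f; infer_instance
def pvWitness_f : Int × Int × String := (5, 26, "")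

def Spec_f (st : Int) (ed : Int) (k : String) (out : Int) : Prop := out = f_alt st ed k
instance (st : Int) (ed : Int) (k : String) (out : Int) : Decidable (Spec_f st ed k out) := by
  unfold Spec_f; infer_instance

-- ===== CLAIM (what is proved, stated in full; the proofs are below) =====
def Claim_equal_f : Prop :=
  ∀ (st : Int) (ed : Int) (k : String), Dom_f st ed k → Pre_f st ed k → Spec_f st ed k (f st ed k)

-- ===== LEMMAS AND PROOFS =====

-- Python's str.count for a single-character needle is List.count
lemma pvCountGo_singleton (c : Char) : ∀ (fuel : Nat) (l : List Char) (acc : Nat),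
    PySem.Chars.count.go [c] fuel l acc = acc + (l.take fuel).count c := by
  intro fuel
  induction fuel with
  | zero => intro l acc; simp [PySem.Chars.count.go]
  | succ n ih =>
    intro l acc
    cases l with
    | nil => simp [PySem.Chars.count.go]
    | cons h t =>
      rw [PySem.Chars.count.go]
      by_cases hc : c = h
      · subst hc
        simp [List.isPrefixOf, ih]
        omega
      · simp [List.isPrefixOf, Ne.symm hc, hc, ih]

lemma pvCount_singleton (c : Char) (k : List Char) :
    PySem.Chars.count k [c] = k.count c := by
  simp [PySem.Chars.count, pvCountGo_singleton]

lemma pvCountA_app_A (k : List Char) :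
    (PySem.Chars.count (k ++ ['A']) ['A'] : Int) = (PySem.Chars.count k ['A'] : Int) + 1 := by
  simp [pvCount_singleton]

lemma pvCountA_app_B (k : List Char) :
    (PySem.Chars.count (k ++ ['B']) ['A'] : Int) = (PySem.Chars.count k ['A'] : Int) := by
  simp [pvCount_singleton]

lemma pvCountA_app_C (k : List Char) :
    (PySem.Chars.count (k ++ ['C']) ['A'] : Int) = (PySem.Chars.count k ['A'] : Int) := by
  simp [pvCount_singleton]

-- the common reference recursion: A's recursion with the string replaced by its A-count
def R : Nat → Int → Int → Int → Int
  | 0, _, _, _ => 0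
  | n + 1, s, ed, a =>
    if s > ed ∨ a > 2 then 0
    else if s = ed then 1
    else R n (s - 2) ed (a + 1) + R n (s * 2) ed a + R n (s * 3) ed a

lemma fAux_eq_R : ∀ (n : Nat) (st ed : Int) (k : List Char),
    fAux n st ed k = R n st ed (PySem.Chars.count k ['A'] : Int) := by
  intro n
  induction n with
  | zero => intro st ed k; rfl
  | succ n ih =>
    intro st ed k
    simp only [fAux, R, ih, pvCountA_app_A, pvCountA_app_B, pvCountA_app_C]

-- Good: states whose recursion terminates; Dm: a fuel bound that decreases into the recursion
def Good (ed s a : Int) : Prop := ed ≤ s ∨ 2 < a ∨ 1 ≤ s - 2 * (2 - a)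

def Dm (s ed a : Int) : Nat :=
  if s < ed ∧ a ≤ 2 then (ed - (s - 2 * (2 - a))).toNat * 4 + (3 - a).toNat + 1 else 1

lemma Dm_pos (s ed a : Int) : 1 ≤ Dm s ed a := by
  simp only [Dm]; split_ifs <;> omega

lemma Dm_sub (s ed a : Int) (h1 : s < ed) (h2 : a ≤ 2) (_h3 : 1 ≤ s - 2 * (2 - a)) :
    Dm (s - 2) ed (a + 1) < Dm s ed a := by
  simp only [Dm]; split_ifs <;> omega

lemma Dm_mul2 (s ed a : Int) (h1 : s < ed) (h2 : a ≤ 2) (h3 : 1 ≤ s - 2 * (2 - a)) :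
    Dm (s * 2) ed a < Dm s ed a := by
  simp only [Dm]; split_ifs <;> omega

lemma Dm_mul3 (s ed a : Int) (h1 : s < ed) (h2 : a ≤ 2) (h3 : 1 ≤ s - 2 * (2 - a)) :
    Dm (s * 3) ed a < Dm s ed a := by
  simp only [Dm]; split_ifs <;> omega

lemma R_stable (ed : Int) : ∀ (N : Nat) (s a : Int), Good ed s a → Dm s ed a ≤ N →
    ∀ (n m : Nat), Dm s ed a ≤ n → Dm s ed a ≤ m → R n s ed a = R m s ed a := by
  intro N
  induction N with
  | zero => intro s a _ hN; have := Dm_pos s ed a; omega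
  | succ N ih =>
    intro s a hg hN n m hn hm
    have hp := Dm_pos s ed a
    obtain ⟨n', rfl⟩ : ∃ n', n = n' + 1 := ⟨n - 1, by omega⟩
    obtain ⟨m', rfl⟩ : ∃ m', m = m' + 1 := ⟨m - 1, by omega⟩
    simp only [R]
    by_cases hbr : s > ed ∨ a > 2
    · simp [hbr]
    by_cases heq : s = ed
    · simp [heq]
    have hbr' := not_or.mp hbr
    have hlt : s < ed := lt_of_le_of_ne (by omega) heq
    have ha2 : a ≤ 2 := by omega
    have hφ : 1 ≤ s - 2 * (2 - a) := by
      rcases hg with h | h | h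
      · omega
      · omega
      · exact h
    have d1 := Dm_sub s ed a hlt ha2 hφ
    have d2 := Dm_mul2 s ed a hlt ha2 hφ
    have d3 := Dm_mul3 s ed a hlt ha2 hφ
    have g1 : Good ed (s - 2) (a + 1) := Or.inr (Or.inr (by omega))
    have g2 : Good ed (s * 2) a := Or.inr (Or.inr (by omega))
    have g3 : Good ed (s * 3) a := Or.inr (Or.inr (by omega))
    simp only [if_neg hbr, if_neg heq]
    rw [ih (s - 2) (a + 1) g1 (by omega) n' m' (by omega) (by omega),
        ih (s * 2) a g2 (by omega) n' m' (by omega) (by omega),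
        ih (s * 3) a g3 (by omega) n' m' (by omega) (by omega)]

-- the canonical value of a terminating state
def Rv (s ed a : Int) : Int := R (Dm s ed a) s ed a

lemma Rv_base0 (s ed a : Int) (h : s > ed ∨ a > 2) : Rv s ed a = 0 := by
  have hp := Dm_pos s ed a
  obtain ⟨d, hd⟩ : ∃ d, Dm s ed a = d + 1 := ⟨Dm s ed a - 1, by omega⟩
  unfold Rv; rw [hd]; simp [R, h]

lemma Rv_base1 (s ed a : Int) (h : ¬(s > ed ∨ a > 2)) (he : s = ed) : Rv s ed a = 1 := by
  have hp := Dm_pos s ed a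
  obtain ⟨d, hd⟩ : ∃ d, Dm s ed a = d + 1 := ⟨Dm s ed a - 1, by omega⟩
  unfold Rv; rw [hd]; simp only [R]; rw [if_neg h, if_pos he]

lemma Rv_rec (s ed a : Int) (hlt : s < ed) (ha2 : a ≤ 2) (hφ : 1 ≤ s - 2 * (2 - a)) :
    Rv s ed a = Rv (s - 2) ed (a + 1) + Rv (s * 2) ed a + Rv (s * 3) ed a := by
  have hp := Dm_pos s ed a
  obtain ⟨d, hd⟩ : ∃ d, Dm s ed a = d + 1 := ⟨Dm s ed a - 1, by omega⟩
  have d1 := Dm_sub s ed a hlt ha2 hφ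
  have d2 := Dm_mul2 s ed a hlt ha2 hφ
  have d3 := Dm_mul3 s ed a hlt ha2 hφ
  have g1 : Good ed (s - 2) (a + 1) := Or.inr (Or.inr (by omega))
  have g2 : Good ed (s * 2) a := Or.inr (Or.inr (by omega))
  have g3 : Good ed (s * 3) a := Or.inr (Or.inr (by omega))
  show R (Dm s ed a) s ed a = _
  rw [hd]
  simp only [R]
  rw [if_neg (by omega), if_neg (by omega)]
  rw [R_stable ed (Dm (s - 2) ed (a + 1)) (s - 2) (a + 1) g1 le_rfl d (Dm (s - 2) ed (a + 1)) (by omega) le_rfl,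
      R_stable ed (Dm (s * 2) ed a) (s * 2) a g2 le_rfl d (Dm (s * 2) ed a) (by omega) le_rfl,
      R_stable ed (Dm (s * 3) ed a) (s * 3) a g3 le_rfl d (Dm (s * 3) ed a) (by omega) le_rfl]
  rfl

-- memo invariant: every cached value is the canonical value of a terminating state
def pvInv (ed : Int) (m : PySem.Dict (Int × Int) Int) : Prop :=
  ∀ (s a v : Int), m.get? (s, a) = some v → Good ed s a ∧ v = Rv s ed a

lemma gAux_correct (ed : Int) : ∀ (n : Nat) (s a : Int) (m : PySem.Dict (Int × Int) Int),
    Good ed s a → Dm s ed a ≤ n → pvInv ed m →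
    (gAux n s ed a m).1 = Rv s ed a ∧ pvInv ed (gAux n s ed a m).2 := by
  intro n
  induction n with
  | zero => intro s a m _ hn _; have := Dm_pos s ed a; omega
  | succ n ih =>
    intro s a m hg hn hInv
    by_cases hbr : s > ed ∨ a > 2
    · simp only [gAux, if_pos hbr]
      exact ⟨(Rv_base0 s ed a hbr).symm, hInv⟩
    by_cases heq : s = ed
    · simp only [gAux, if_neg hbr, if_pos heq]
      exact ⟨(Rv_base1 s ed a hbr heq).symm, hInv⟩
    have hbr' := not_or.mp hbr
    have hlt : s < ed := lt_of_le_of_ne (by omega) heq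
    have ha2 : a ≤ 2 := by omega
    have hφ : 1 ≤ s - 2 * (2 - a) := by
      rcases hg with h | h | h
      · omega
      · omega
      · exact h
    cases hget : m.get? (s, a) with
    | some v =>
      simp only [gAux, if_neg hbr, if_neg heq, hget]
      exact ⟨(hInv s a v hget).2, hInv⟩
    | none =>
      have d1 := Dm_sub s ed a hlt ha2 hφ
      have d2 := Dm_mul2 s ed a hlt ha2 hφ
      have d3 := Dm_mul3 s ed a hlt ha2 hφ
      have g1 : Good ed (s - 2) (a + 1) := Or.inr (Or.inr (by omega))
      have g2 : Good ed (s * 2) a := Or.inr (Or.inr (by omega))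
      have g3 : Good ed (s * 3) a := Or.inr (Or.inr (by omega))
      obtain ⟨h1v, h1m⟩ := ih (s - 2) (a + 1) m g1 (by omega) hInv
      obtain ⟨h2v, h2m⟩ := ih (s * 2) a (gAux n (s - 2) ed (a + 1) m).2 g2 (by omega) h1m
      obtain ⟨h3v, h3m⟩ :=
        ih (s * 3) a (gAux n (s * 2) ed a (gAux n (s - 2) ed (a + 1) m).2).2 g3 (by omega) h2m
      simp only [gAux, if_neg hbr, if_neg heq, hget]
      rw [h1v, h2v, h3v]
      constructor
      · exact (Rv_rec s ed a hlt ha2 hφ).symm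
      · intro s' a' v' hg'
        rw [PySem.Dict.get?_insert] at hg'
        by_cases hk : (s', a') = (s, a)
        · rw [if_pos hk] at hg'
          have hs' : s' = s := congrArg Prod.fst hk
          have ha' : a' = a := congrArg Prod.snd hk
          rw [hs', ha']
          refine ⟨Or.inr (Or.inr hφ), ?_⟩
          rw [Rv_rec s ed a hlt ha2 hφ]
          exact (Option.some.inj hg').symm
        · rw [if_neg hk] at hg'
          exact h3m s' a' v' hg'

theorem pv_main (st ed : Int) (k : String) (hpre : Pre_f st ed k) : f st ed k = f_alt st ed k := by
  have ha0 : (0 : Int) ≤ (PySem.Chars.count k.toList ['A'] : Int) := Int.natCast_nonneg _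
  have hg : Good ed st (PySem.Chars.count k.toList ['A'] : Int) := by
    rcases hpre with h | h | h
    · exact Or.inl h
    · exact Or.inr (Or.inl h)
    · exact Or.inr (Or.inr (by omega))
  have hDm : Dm st ed (PySem.Chars.count k.toList ['A'] : Int) ≤ pvFuel st ed := by
    simp only [Dm, pvFuel]; split_ifs <;> omega
  have hA : f st ed k = R (pvFuel st ed) st ed (PySem.Chars.count k.toList ['A'] : Int) :=
    fAux_eq_R (pvFuel st ed) st ed k.toList
  have hInv0 : pvInv ed PySem.Dict.empty := by
    intro s a v h
    rw [PySem.Dict.get?_empty] at h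
    exact absurd h (by simp)
  have hB := gAux_correct ed (pvFuel st ed) st (PySem.Chars.count k.toList ['A'] : Int)
    PySem.Dict.empty hg hDm hInv0
  have hA2 : R (pvFuel st ed) st ed (PySem.Chars.count k.toList ['A'] : Int)
      = Rv st ed (PySem.Chars.count k.toList ['A'] : Int) :=
    R_stable ed (pvFuel st ed) st (PySem.Chars.count k.toList ['A'] : Int) hg hDm
      (pvFuel st ed) (Dm st ed (PySem.Chars.count k.toList ['A'] : Int)) hDm le_rfl
  unfold f_alt
  rw [hA, hA2]
  exact hB.1.symm

-- ===== VERDICT (by name: the statement is the Claim_ definition above) =====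
theorem f_spec : Claim_equal_f := by
  intro st ed k _ hpre
  unfold Spec_f
  exact pv_main st ed k hpre
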